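-- pv_equiv track=rewrite | github.com/billyedmoore/aoc | 2015/eleven.py | repeated_pairs
-- ===== SOURCE A (Python) =====
-- def repeated_pairs(password: str) -> bool:
--     for j in range(2):
--         prev = password[0]
--         for i,c in enumerate(password[1:]):
--             i += 1
--             if c == prev:
--                 if j == 0:
--                     password = password[:i-1] + "!?" + password[i+1:]
--                 break
--             prev = c
--         else:
--             return False
--     return True
-- ===== SOURCE B (Python) =====
-- def repeated_pairs(password: str) -> bool:
--     pairs = 0
--     i = 1
--     while i < len(password):
--         if password[i] == password[i - 1]:
--             pairs += 1
--             if pairs == 2: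
--                 return True
--             i += 2  # skip past the matched pair so it cannot overlap the next one
--         else:
--             i += 1
--     return False
-- ===== Notes on version B (the rewrite author's own statement) =====
-- stated objective: simpler
-- what changed: Replaced A's two-pass mask-and-rescan (find first pair, overwrite it with "!?", rescan) by a single greedy left-to-right pass that counts non-overlapping adjacent pairs, skipping past each matched pair.
-- intended difference: On inputs whose first adjacent pair is immediately preceded by '!' or followed by '?' and that contain no further adjacent pair, A returns True because its "!?" mask fabricates a second pair against those neighbours, while B returns False, the intended answer (only one repeated pair exists). — e.g. on repeated_pairs("!aa"): A returns true, B returns false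
import Mathlib
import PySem

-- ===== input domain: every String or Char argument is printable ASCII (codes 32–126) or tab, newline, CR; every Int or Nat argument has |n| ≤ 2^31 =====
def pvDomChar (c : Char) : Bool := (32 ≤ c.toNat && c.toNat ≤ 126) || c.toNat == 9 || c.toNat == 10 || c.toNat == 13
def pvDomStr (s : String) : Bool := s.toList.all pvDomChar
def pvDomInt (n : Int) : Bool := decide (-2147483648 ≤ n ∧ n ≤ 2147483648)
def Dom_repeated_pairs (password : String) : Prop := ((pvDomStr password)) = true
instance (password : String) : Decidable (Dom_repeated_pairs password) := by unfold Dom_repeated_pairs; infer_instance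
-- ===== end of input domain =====

-- B is a single greedy left-to-right pass counting non-overlapping adjacent pairs (objective: simpler);
-- on the rare inputs where A's "!?" mask collides with a neighbouring '!'/'?' B returns the intended value (see D_).

-- ===== PORT A =====
-- inner `for i,c in enumerate(password[1:]): i += 1; if c == prev: break; prev = c`:
-- returns the break index i (position of the second pair character), none when the loop completes.
def findPair : Char → List Char → Nat → Option Nat
  | _, [], _ => none
  | prev, c :: rest, i => if c == prev then some i else findPair c rest (i + 1)

-- the two iterations j = 0, 1 of A's outer loop, unrolled as in the source;
-- the slices password[:i-1] / password[i+1:] have nonnegative bounds (i ≥ 1), so take/drop are exact.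
def repA : List Char → Bool
  | [] => false  -- unreachable under Pre_: Python raises IndexError on password[0]
  | c0 :: rest =>
    match findPair c0 rest 1 with
    | none => false
    | some i =>
      match (c0 :: rest).take (i - 1) ++ '!' :: '?' :: (c0 :: rest).drop (i + 1) with
      | [] => false  -- unreachable: the masked string contains '!'
      | d0 :: rest' =>
        match findPair d0 rest' 1 with
        | none => false
        | some _ => true

def repeated_pairs (password : String) : Bool := repA password.toList

-- ===== PORT B =====
-- Source B's while loop: compare password[i] with password[i-1]; on a match count it and
-- jump i by 2, otherwise by 1 — i.e. drop two resp. one leading characters.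
def greedy : List Char → Nat → Bool
  | c1 :: c2 :: rest, pairs =>
    if c2 == c1 then
      (if pairs + 1 == 2 then true else greedy rest (pairs + 1))
    else greedy (c2 :: rest) pairs
  | _, _ => false

def repeated_pairs_alt (password : String) : Bool := greedy password.toList 0

-- ===== PRECONDITION & SPEC =====
-- Pre_ excludes only the empty string, on which A raises IndexError (password[0]).
def Pre_repeated_pairs (password : String) : Prop := password ≠ ""
instance (password : String) : Decidable (Pre_repeated_pairs password) := by unfold Pre_repeated_pairs; infer_instance
def pvWitness_repeated_pairs : String := "abcc"

-- On inputs whose first adjacent pair (at p, p+1) is immediately preceded by '!' or followed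
-- by '?' and that contain no further adjacent pair after it, A returns True — its "!?" mask
-- fabricates a second pair against those neighbours — while B returns the intended False.
-- pairFreeTail l: l contains no adjacent equal pair at all
def pairFreeTail : List Char → Bool
  | [] => true
  | [_] => true
  | a :: b :: r => decide (b ≠ a) && pairFreeTail (b :: r)

-- dScan pc l: walking l with preceding character pc, the first adjacent equal pair of l
-- exists, collides with a neighbouring '!' (before) or '?' (after), and no pair follows it
def dScan : Option Char → List Char → Bool
  | _, [] => false
  | _, [_] => false
  | pc, a :: b :: r =>
    if b = a then ((pc == some '!') || (r.head? == some '?')) && pairFreeTail r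
    else dScan (some a) (b :: r)

def D_repeated_pairs (password : String) : Prop := dScan none password.toList = true
instance (password : String) : Decidable (D_repeated_pairs password) := by unfold D_repeated_pairs; infer_instance

def Spec_repeated_pairs (password : String) (out : Bool) : Prop := ¬ D_repeated_pairs password → out = repeated_pairs_alt password
instance (password : String) (out : Bool) : Decidable (Spec_repeated_pairs password out) := by unfold Spec_repeated_pairs; infer_instance

def pvDiffWitness_repeated_pairs : String := "!aa"
def pvDiffWitnessOut_repeated_pairs : Bool × Bool := (true, false)

-- ===== CLAIM (what is proved, stated in full; the proofs are below) =====
def Claim_unchanged_repeated_pairs : Prop := ∀ (password : String), Dom_repeated_pairs password → Pre_repeated_pairs password → Spec_repeated_pairs password (repeated_pairs password)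
def Claim_changed_repeated_pairs : Prop := Dom_repeated_pairs (pvDiffWitness_repeated_pairs) ∧ Pre_repeated_pairs (pvDiffWitness_repeated_pairs) ∧ D_repeated_pairs (pvDiffWitness_repeated_pairs) ∧ repeated_pairs (pvDiffWitness_repeated_pairs) = pvDiffWitnessOut_repeated_pairs.1 ∧ repeated_pairs_alt (pvDiffWitness_repeated_pairs) = pvDiffWitnessOut_repeated_pairs.2 ∧ pvDiffWitnessOut_repeated_pairs.1 ≠ pvDiffWitnessOut_repeated_pairs.2
def Claim_exact_repeated_pairs : Prop := ∀ (password : String), Dom_repeated_pairs password → Pre_repeated_pairs password → D_repeated_pairs password → repeated_pairs password ≠ repeated_pairs_alt password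

-- ===== LEMMAS AND PROOFS =====

-- proof-side helpers: index of the first adjacent equal pair, and existence of any such pair
def firstPairIdx? : List Char → Option Nat
  | a :: b :: r => if b = a then some 0 else (firstPairIdx? (b :: r)).map (· + 1)
  | _ => none

def hasAdjPair : List Char → Bool
  | a :: b :: r => b == a || hasAdjPair (b :: r)
  | _ => false

theorem findPair_eq_fp (l : List Char) : ∀ (prev : Char) (i : Nat),
    findPair prev l i = (firstPairIdx? (prev :: l)).map (· + i) := by
  induction l with
  | nil => intro prev i; simp [findPair, firstPairIdx?]
  | cons c rest ih =>
    intro prev i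
    by_cases h : c = prev
    · simp [findPair, firstPairIdx?, h]
    · simp only [findPair, firstPairIdx?, if_neg h, beq_iff_eq]
      rw [ih c (i + 1)]
      cases firstPairIdx? (c :: rest) <;> simp
      omega

theorem hasAdjPair_eq_isSome (l : List Char) : hasAdjPair l = (firstPairIdx? l).isSome := by
  induction l with
  | nil => simp [hasAdjPair, firstPairIdx?]
  | cons a t ih =>
    cases t with
    | nil => simp [hasAdjPair, firstPairIdx?]
    | cons b r =>
      by_cases h : b = a
      · simp [hasAdjPair, firstPairIdx?, h]
      · have hb : (b == a) = false := by simp [h]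
        simp only [hasAdjPair, firstPairIdx?, if_neg h, hb, Bool.false_or]
        rw [ih]
        cases firstPairIdx? (b :: r) <;> simp

theorem repA_none (s : List Char) (h : firstPairIdx? s = none) : repA s = false := by
  cases s with
  | nil => rfl
  | cons c0 rest =>
    simp only [repA, findPair_eq_fp, h, Option.map_none]

theorem repA_some (s : List Char) (p : Nat) (h : firstPairIdx? s = some p) :
    repA s = hasAdjPair (s.take p ++ '!' :: '?' :: s.drop (p + 2)) := by
  cases s with
  | nil => simp [firstPairIdx?] at h
  | cons c0 rest =>
    simp only [repA, findPair_eq_fp, h, Option.map_some]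
    have hp1 : p + 1 - 1 = p := by omega
    have hp2 : p + 1 + 1 = p + 2 := by omega
    rw [hp1, hp2]
    cases hm : (c0 :: rest).take p ++ '!' :: '?' :: (c0 :: rest).drop (p + 2) with
    | nil => exact absurd hm (by simp)
    | cons d0 rest' =>
      rw [hasAdjPair_eq_isSome]
      cases hfpi : firstPairIdx? (d0 :: rest') <;> simp [hfpi]

theorem greedy_one (l : List Char) : greedy l 1 = hasAdjPair l := by
  induction l with
  | nil => simp [greedy, hasAdjPair]
  | cons a t ih =>
    cases t with
    | nil => simp [greedy, hasAdjPair]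
    | cons b r =>
      by_cases h : b = a
      · simp [greedy, hasAdjPair, h]
      · have hb : (b == a) = false := by simp [h]
        simp only [greedy, hasAdjPair, hb, Bool.false_or, if_neg, Bool.false_eq_true]
        exact ih

theorem greedy_zero_none (s : List Char) (h : firstPairIdx? s = none) : greedy s 0 = false := by
  induction s with
  | nil => rfl
  | cons a t ih =>
    cases t with
    | nil => rfl
    | cons b r =>
      by_cases hba : b = a
      · simp [firstPairIdx?, hba] at h
      · simp only [firstPairIdx?, if_neg hba] at h
        have hn : firstPairIdx? (b :: r) = none := by
          cases hq : firstPairIdx? (b :: r) <;> rw [hq] at h <;> simp_all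
        have hb : (b == a) = false := by simp [hba]
        simp only [greedy, hb, Bool.false_eq_true, if_neg]
        exact ih hn

theorem greedy_zero_some (s : List Char) : ∀ p, firstPairIdx? s = some p →
    greedy s 0 = hasAdjPair (s.drop (p + 2)) := by
  induction s with
  | nil => intro p h; simp [firstPairIdx?] at h
  | cons a t ih =>
    intro p h
    cases t with
    | nil => simp [firstPairIdx?] at h
    | cons b r =>
      by_cases hba : b = a
      · simp [firstPairIdx?, hba] at h
        subst h
        have hb : (b == a) = true := by simp [hba]
        simp only [greedy, hb, if_true]
        norm_num
        simpa using greedy_one r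
      · simp only [firstPairIdx?, if_neg hba] at h
        cases hq : firstPairIdx? (b :: r) with
        | none => rw [hq] at h; simp at h
        | some q =>
          rw [hq] at h; simp at h
          subst h
          have hb : (b == a) = false := by simp [hba]
          simp only [greedy, hb, Bool.false_eq_true, if_neg]
          rw [ih q hq]
          rfl

-- the core lemma: an adjacent pair of the masked string is a '!'/'?' boundary collision
-- or an adjacent pair strictly after the two masked positions
theorem mask_lemma (s : List Char) : ∀ p, firstPairIdx? s = some p →
    (hasAdjPair (s.take p ++ '!' :: '?' :: s.drop (p + 2)) = true ↔
      ((1 ≤ p ∧ s.getD (p - 1) ' ' = '!') ∨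
       (p + 2 < s.length ∧ s.getD (p + 2) ' ' = '?') ∨
       hasAdjPair (s.drop (p + 2)) = true)) := by
  induction s with
  | nil => intro p h; simp [firstPairIdx?] at h
  | cons a t ih =>
    intro p h
    cases t with
    | nil => simp [firstPairIdx?] at h
    | cons b r =>
      by_cases hba : b = a
      · -- first pair right at the front: p = 0
        simp [firstPairIdx?, hba] at h
        subst h
        cases r with
        | nil => simp [hasAdjPair]
        | cons c r' =>
          simp only [List.take_zero, List.nil_append, List.drop_succ_cons, List.drop_zero,
            List.length_cons, List.getD_cons_succ, List.getD_cons_zero]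
          have e1 : hasAdjPair ('!' :: '?' :: c :: r') = hasAdjPair ('?' :: c :: r') := by
            simp [hasAdjPair]
          have e2 : hasAdjPair ('?' :: c :: r') = ((c == '?') || hasAdjPair (c :: r')) := rfl
          rw [e1, e2]
          simp only [Bool.or_eq_true, beq_iff_eq]
          constructor
          · rintro (hc | hp)
            · exact Or.inr (Or.inl ⟨by omega, hc⟩)
            · exact Or.inr (Or.inr hp)
          · rintro (⟨h1, _⟩ | ⟨_, hc⟩ | hp)
            · omega
            · exact Or.inl hc
            · exact Or.inr hp
      · -- head does not pair: p = q + 1 with fp (b :: r) = some q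
        simp only [firstPairIdx?, if_neg hba] at h
        cases hq : firstPairIdx? (b :: r) with
        | none => rw [hq] at h; simp at h
        | some q =>
          rw [hq] at h; simp at h
          subst h
          cases hq0 : q with
          | zero =>
            -- p = 1: masked list is a :: '!' :: '?' :: (drop of the rest)
            subst hq0
            -- fp (b :: r) = some 0 forces r = c :: r' with c = b
            cases r with
            | nil => simp [firstPairIdx?] at hq
            | cons c r' =>
              have hcb : c = b := by
                by_cases hcb : c = b
                · exact hcb
                · simp [firstPairIdx?, hcb] at hq
              have e1 : hasAdjPair (a :: '!' :: '?' :: r') =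
                  (('!' == a) || hasAdjPair ('!' :: '?' :: r')) := rfl
              have e2 : hasAdjPair ('!' :: '?' :: r') = hasAdjPair ('?' :: r') := by
                simp [hasAdjPair]
              show hasAdjPair ([a] ++ '!' :: '?' :: r') = true ↔ _
              simp only [List.singleton_append, e1, e2, List.length_cons,
                List.getD_cons_succ, List.getD_cons_zero]
              cases r' with
              | nil =>
                simp only [Nat.add_sub_cancel, List.getD_cons_zero, List.getD_cons_succ,
                  List.length_cons, List.drop_succ_cons, List.drop_nil]
                constructor
                · intro h'
                  rcases (by simpa [hasAdjPair] using h' :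
                      ('!' : Char) = a ∨ hasAdjPair ['?'] = true) with ha | hbad
                  · exact Or.inl ⟨le_refl 1, ha.symm⟩
                  · simp [hasAdjPair] at hbad
                · rintro (⟨_, ha⟩ | ⟨hl, _⟩ | hp)
                  · simp [hasAdjPair, ha]
                  · simp at hl
                  · simp [hasAdjPair] at hp
              | cons d r'' =>
                have e3 : hasAdjPair ('?' :: d :: r'') = ((d == '?') || hasAdjPair (d :: r'')) := rfl
                rw [e3]
                simp only [Bool.or_eq_true, beq_iff_eq, List.length_cons, Nat.add_sub_cancel,
                  List.getD_cons_succ, List.getD_cons_zero, List.drop_succ_cons, List.drop_zero]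
                constructor
                · rintro (ha | hd | hp)
                  · exact Or.inl ⟨le_refl 1, ha.symm⟩
                  · exact Or.inr (Or.inl ⟨by omega, hd⟩)
                  · exact Or.inr (Or.inr hp)
                · rintro (⟨_, ha⟩ | ⟨_, hd⟩ | hp)
                  · exact Or.inl ha.symm
                  · exact Or.inr (Or.inl hd)
                  · exact Or.inr (Or.inr hp)
          | succ q' =>
            subst hq0
            have IH := ih (q' + 1) hq
            have hb : (b == a) = false := by simp [hba]
            have e0 : (List.take (q' + 1 + 1) (a :: b :: r) ++ '!' :: '?' :: List.drop (q' + 1 + 1 + 2) (a :: b :: r))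
                = a :: b :: (List.take q' r ++ '!' :: '?' :: List.drop (q' + 1 + 2) (b :: r)) := by
              simp [List.take_succ_cons]
            rw [e0]
            have e1 : hasAdjPair (a :: b :: (List.take q' r ++ '!' :: '?' :: List.drop (q' + 1 + 2) (b :: r)))
                = ((b == a) || hasAdjPair (b :: (List.take q' r ++ '!' :: '?' :: List.drop (q' + 1 + 2) (b :: r)))) := rfl
            rw [e1, hb, Bool.false_or]
            have e2 : (b :: (List.take q' r ++ '!' :: '?' :: List.drop (q' + 1 + 2) (b :: r)))
                = ((b :: r).take (q' + 1) ++ '!' :: '?' :: (b :: r).drop (q' + 1 + 2)) := by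
              simp [List.take_succ_cons]
            rw [e2, IH]
            have edrop : List.drop (q' + 1 + 1 + 2) (a :: b :: r) = List.drop (q' + 1 + 2) (b :: r) := rfl
            rw [edrop]
            simp only [List.length_cons, Nat.add_sub_cancel, List.getD_cons_succ]
            constructor
            · rintro (⟨_, h1⟩ | ⟨h2, h2'⟩ | hp)
              · exact Or.inl ⟨by omega, h1⟩
              · exact Or.inr (Or.inl ⟨by omega, h2'⟩)
              · exact Or.inr (Or.inr hp)
            · rintro (⟨_, h1⟩ | ⟨h2, h2'⟩ | hp)
              · exact Or.inl ⟨by omega, h1⟩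
              · exact Or.inr (Or.inl ⟨by omega, h2'⟩)
              · exact Or.inr (Or.inr hp)

theorem pairFreeTail_iff (l : List Char) : pairFreeTail l = true ↔ hasAdjPair l = false := by
  induction l with
  | nil => simp [pairFreeTail, hasAdjPair]
  | cons a t ih =>
    cases t with
    | nil => simp [pairFreeTail, hasAdjPair]
    | cons b r =>
      by_cases hba : b = a
      · simp [pairFreeTail, hasAdjPair, hba]
      · simp [pairFreeTail, hasAdjPair, hba, ih]

theorem head?_drop_iff (l : List Char) (n : Nat) (c : Char) :
    (l.drop n).head? = some c ↔ (n < l.length ∧ l.getD n ' ' = c) := by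
  rw [List.head?_drop]
  constructor
  · intro h
    obtain ⟨hlt, he⟩ := List.getElem?_eq_some_iff.mp h
    exact ⟨hlt, by simp [List.getD_eq_getElem?_getD, h]⟩
  · rintro ⟨hlt, he⟩
    rw [List.getElem?_eq_some_iff]
    exact ⟨hlt, by simp [List.getD_eq_getElem?_getD, List.getElem?_eq_getElem hlt] at he; exact he⟩

theorem dScan_iff (l : List Char) : ∀ pc : Option Char,
    (dScan pc l = true ↔ ∃ p, firstPairIdx? l = some p ∧
      hasAdjPair (l.drop (p + 2)) = false ∧
      (((if p = 0 then pc else some (l.getD (p - 1) ' ')) = some '!') ∨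
       ((l.drop (p + 2)).head? = some '?'))) := by
  induction l with
  | nil => intro pc; simp [dScan, firstPairIdx?]
  | cons a t ih =>
    intro pc
    cases t with
    | nil => simp [dScan, firstPairIdx?]
    | cons b r =>
      by_cases hba : b = a
      · rw [show dScan pc (a :: b :: r) =
            (((pc == some '!') || (r.head? == some '?')) && pairFreeTail r) from by
          simp [dScan, hba]]
        constructor
        · intro h
          obtain ⟨hor, hpf⟩ := Bool.and_eq_true_iff.mp h
          refine ⟨0, by simp [firstPairIdx?, hba], by simpa using (pairFreeTail_iff r).mp hpf, ?_⟩
          rcases Bool.or_eq_true_iff.mp hor with h1 | h2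
          · exact Or.inl (by simpa using h1)
          · exact Or.inr (by simpa using h2)
        · rintro ⟨p, hfp, hdr, hb⟩
          have hp0 : p = 0 := (show (0 : Nat) = p by simpa [firstPairIdx?, hba] using hfp).symm
          subst hp0
          simp only [List.drop_succ_cons, List.drop_zero] at hdr hb
          refine Bool.and_eq_true_iff.mpr ⟨?_, (pairFreeTail_iff r).mpr hdr⟩
          rcases hb with h1 | h2
          · exact Bool.or_eq_true_iff.mpr (Or.inl (by simpa using h1))
          · exact Bool.or_eq_true_iff.mpr (Or.inr (by simpa using h2))
      · rw [show dScan pc (a :: b :: r) = dScan (some a) (b :: r) from by simp [dScan, hba]]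
        rw [ih (some a)]
        constructor
        · rintro ⟨q, hfp, hdr, hb⟩
          refine ⟨q + 1, by simp [firstPairIdx?, hba, hfp], hdr, ?_⟩
          rcases hb with h1 | h2
          · left
            cases q with
            | zero => simpa using h1
            | succ q' => simpa [List.getD_cons_succ] using h1
          · exact Or.inr h2
        · rintro ⟨p, hfp, hdr, hb⟩
          have : ∃ q, firstPairIdx? (b :: r) = some q ∧ p = q + 1 := by
            simp only [firstPairIdx?, if_neg hba] at hfp
            cases hq : firstPairIdx? (b :: r) with
            | none => rw [hq] at hfp; simp at hfp
            | some q => rw [hq] at hfp; simp at hfp; exact ⟨q, rfl, hfp.symm⟩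
          obtain ⟨q, hq, hpq⟩ := this
          subst hpq
          refine ⟨q, hq, hdr, ?_⟩
          rcases hb with h1 | h2
          · left
            cases q with
            | zero => simpa using h1
            | succ q' => simpa [List.getD_cons_succ] using h1
          · exact Or.inr h2

theorem D_iff (password : String) : D_repeated_pairs password ↔
    ∃ p, firstPairIdx? password.toList = some p ∧
      hasAdjPair (password.toList.drop (p + 2)) = false ∧
      ((1 ≤ p ∧ password.toList.getD (p - 1) ' ' = '!') ∨
       (p + 2 < password.toList.length ∧ password.toList.getD (p + 2) ' ' = '?')) := by
  unfold D_repeated_pairs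
  rw [dScan_iff password.toList none]
  constructor
  · rintro ⟨p, hfp, hdr, hb⟩
    refine ⟨p, hfp, hdr, ?_⟩
    rcases hb with h1 | h2
    · cases p with
      | zero => simp at h1
      | succ q => exact Or.inl ⟨by omega, by simpa using h1⟩
    · exact Or.inr ((head?_drop_iff _ _ _).mp h2)
  · rintro ⟨p, hfp, hdr, hb⟩
    refine ⟨p, hfp, hdr, ?_⟩
    rcases hb with ⟨h1, h1'⟩ | h2
    · cases p with
      | zero => omega
      | succ q => exact Or.inl (by simpa using h1')
    · exact Or.inr ((head?_drop_iff _ _ _).mpr h2)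

-- ===== VERDICT (by name: the statements are the Claim_ definitions above) =====
theorem repeated_pairs_spec : Claim_unchanged_repeated_pairs := by
  intro password _ _ hnD
  rw [D_iff password] at hnD
  unfold repeated_pairs repeated_pairs_alt
  set s := password.toList with hs
  cases hfp : firstPairIdx? s with
  | none => rw [repA_none s hfp, greedy_zero_none s hfp]
  | some p =>
    rw [repA_some s p hfp, greedy_zero_some s p hfp]
    cases hdr : hasAdjPair (s.drop (p + 2)) with
    | true =>
      rw [(mask_lemma s p hfp).mpr (Or.inr (Or.inr hdr))]
    | false =>
      have hnb : ¬ ((1 ≤ p ∧ s.getD (p - 1) ' ' = '!') ∨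
          (p + 2 < s.length ∧ s.getD (p + 2) ' ' = '?')) := by
        intro hb
        exact hnD ⟨p, hfp, hdr, hb⟩
      cases hmk : hasAdjPair (s.take p ++ '!' :: '?' :: s.drop (p + 2)) with
      | false => rfl
      | true =>
        rcases (mask_lemma s p hfp).mp hmk with hb1 | hb2 | hp3
        · exact absurd (Or.inl hb1) hnb
        · exact absurd (Or.inr hb2) hnb
        · rw [hdr] at hp3; exact absurd hp3 (by simp)

theorem repeated_pairs_changed : Claim_changed_repeated_pairs := by
  unfold Claim_changed_repeated_pairs; decide

theorem repeated_pairs_tight : Claim_exact_repeated_pairs := by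
  intro password _ _ hD
  rcases (D_iff password).mp hD with ⟨p, hfp, hdr, hb⟩
  unfold repeated_pairs repeated_pairs_alt
  set s := password.toList with hs
  rw [repA_some s p hfp, greedy_zero_some s p hfp, hdr]
  rw [(mask_lemma s p hfp).mpr (by
    rcases hb with hb | hb
    · exact Or.inl hb
    · exact Or.inr (Or.inl hb))]
  simp
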